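-- pv_equiv track=rewrite | github.com/jakipatryk/aoc-2020 | 21/solution.py | calculate_possible_alergens
-- ===== SOURCE A (Python) =====
-- from collections import defaultdict
--
-- def calculate_possible_alergens(food):
--     all_ingradients = {ingradient for ingradients,
--                        _ in food for ingradient in ingradients}
--     possible_alergens = defaultdict(lambda: all_ingradients)
--     for ingradients, alergens in food:
--         for alergen in alergens:
--             possible_alergens[alergen] = possible_alergens[alergen] & set(
--                 ingradients)
--     return possible_alergens, all_ingradients
-- ===== SOURCE B (Python) =====
-- from collections import defaultdict, Counter
--
--
-- def calculate_possible_alergens(food):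
--     all_ingradients = set()
--     occurrences = []
--     for ingradients, alergens in food:
--         all_ingradients.update(ingradients)
--         ing_set = set(ingradients)
--         for alergen in alergens:
--             occurrences.append((alergen, ing_set))
--     total = Counter(alergen for alergen, _ in occurrences)
--     co = defaultdict(Counter)
--     for alergen, ings in occurrences:
--         co[alergen].update(ings)
--     possible_alergens = defaultdict(lambda: all_ingradients)
--     for alergen in total:  # Counter iterates its keys in first-insertion order
--         tot = total[alergen]
--         coal = co[alergen]
--         possible_alergens[alergen] = {ing for ing in all_ingradients
--                                       if coal[ing] == tot}
--     return possible_alergens, all_ingradients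
-- ===== Notes on version B (the rewrite author's own statement) =====
-- stated objective: alternative
-- what changed: Replaces the running set-intersection fold over the foods with a tally: one pass collects (allergen, ingredient-set) occurrences, Counters give each allergen's occurrence count and per-ingredient co-occurrence counts, and an ingredient is possible for an allergen iff its co-occurrence count equals the allergen's total count.
import Mathlib
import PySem

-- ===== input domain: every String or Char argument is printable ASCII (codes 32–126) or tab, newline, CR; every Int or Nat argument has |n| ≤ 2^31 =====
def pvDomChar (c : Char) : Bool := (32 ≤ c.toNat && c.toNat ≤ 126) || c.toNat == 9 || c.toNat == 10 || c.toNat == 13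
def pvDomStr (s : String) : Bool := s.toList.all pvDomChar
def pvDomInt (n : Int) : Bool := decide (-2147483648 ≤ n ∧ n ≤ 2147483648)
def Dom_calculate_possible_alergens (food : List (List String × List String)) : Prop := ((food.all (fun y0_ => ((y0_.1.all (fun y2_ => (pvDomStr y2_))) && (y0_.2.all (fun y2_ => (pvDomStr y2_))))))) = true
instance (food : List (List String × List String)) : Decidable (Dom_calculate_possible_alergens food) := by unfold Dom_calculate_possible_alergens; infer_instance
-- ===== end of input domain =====

-- B replaces A's running set-intersection fold with a tally: a per-allergen occurrence count
-- and per-allergen ingredient co-occurrence counts, then a count-equals-total test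
-- (alternative decomposition of the same computation; both programs are pure).

-- ===== PORT A =====
def calculate_possible_alergens (food : List (List String × List String)) : (List (String × List String)) × List String :=
  let all_ingradients : PySem.Set String :=
    food.foldl (fun s p => p.1.foldl (fun s i => PySem.Set.add s i) s) PySem.Set.empty
  let possible_alergens : PySem.Dict String (List String) :=
    food.foldl (fun d p =>
      p.2.foldl (fun d al =>
        d.insert al (PySem.Set.inter (d.getD al all_ingradients) (PySem.Set.ofList p.1))) d)
      PySem.Dict.empty
  (possible_alergens.items, all_ingradients)

-- ===== PORT B =====
def calculate_possible_alergens_alt (food : List (List String × List String)) : (List (String × List String)) × List String :=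
  -- one pass: all ingredients seen, and one (allergen, ingredient-set) entry per listing
  let st : PySem.Set String × List (String × PySem.Set String) :=
    food.foldl (fun st p =>
      (PySem.Set.update st.1 p.1,
       p.2.foldl (fun acc al => acc ++ [(al, PySem.Set.ofList p.1)]) st.2))
      (PySem.Set.empty, [])
  let all_ingradients : PySem.Set String := st.1
  let occurrences : List (String × PySem.Set String) := st.2
  let total : PySem.Dict String Int :=
    PySem.Dict.counter (occurrences.map (fun o => o.1))
  let co : PySem.Dict String (PySem.Dict String Int) :=
    occurrences.foldl (fun d o =>
      d.modify o.1 PySem.Dict.empty (fun c =>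
        o.2.foldl (fun c ing => c.modify ing 0 (· + 1)) c)) PySem.Dict.empty
  let possible_alergens : PySem.Dict String (List String) :=
    total.keys.foldl (fun d al =>
      d.insert al (PySem.Set.ofList (all_ingradients.filter (fun ing =>
        (co.getD al PySem.Dict.empty).getD ing 0 == total.getD al 0)))) PySem.Dict.empty
  (possible_alergens.items, all_ingradients)

-- ===== PRECONDITION & SPEC =====
def Spec_calculate_possible_alergens (food : List (List String × List String)) (out : (List (String × List String)) × List String) : Prop := out = calculate_possible_alergens_alt food
instance (food : List (List String × List String)) (out : (List (String × List String)) × List String) : Decidable (Spec_calculate_possible_alergens food out) := by unfold Spec_calculate_possible_alergens; infer_instance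

-- ===== CLAIM (what is proved, stated in full; the proofs are below) =====
def Claim_equal_calculate_possible_alergens : Prop := ∀ (food : List (List String × List String)), Dom_calculate_possible_alergens food → Spec_calculate_possible_alergens food (calculate_possible_alergens food)

-- ===== LEMMAS AND PROOFS =====

-- occurrence list: one entry (allergen, ingredient set) per allergen listed by a food
def occOf (food : List (List String × List String)) : List (String × PySem.Set String) :=
  food.flatMap (fun p => p.2.map (fun al => (al, PySem.Set.ofList p.1)))

-- the possible-ingredient set of allergen al: ingredients present in every food listing al
def valOf (allIng : PySem.Set String) (L : List (String × PySem.Set String)) (al : String) : List String :=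
  allIng.filter (fun x => L.all (fun o => !(o.1 == al) || PySem.Set.contains o.2 x))

theorem nodup_snd_occOf (food : List (List String × List String)) :
    ∀ o ∈ occOf food, (o.2 : List String).Nodup := by
  intro o ho
  simp only [occOf, List.mem_flatMap, List.mem_map] at ho
  obtain ⟨p, -, al, -, rfl⟩ := ho
  apply PySem.Set.nodup_ofList

-- B's first loop, split into its two components
theorem pairfold : ∀ (food : List (List String × List String)) (s : PySem.Set String)
    (acc : List (String × PySem.Set String)),
    food.foldl (fun st p =>
      (PySem.Set.update st.1 p.1,
       p.2.foldl (fun acc al => acc ++ [(al, PySem.Set.ofList p.1)]) st.2)) (s, acc)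
      = (food.foldl (fun s p => PySem.Set.update s p.1) s, acc ++ occOf food) := by
  intro food
  induction food with
  | nil => intro s acc; simp [occOf]
  | cons p food ih =>
    intro s acc
    simp only [List.foldl_cons]
    rw [ih, PySem.List.foldl_append_singleton_eq_map]
    simp [occOf, List.flatMap_cons]

-- A's nested dict loop is a fold over the occurrence list
theorem foldA_eq (allIng : PySem.Set String) (food : List (List String × List String))
    (d : PySem.Dict String (List String)) :
    food.foldl (fun d p => p.2.foldl (fun d al =>
        d.insert al (PySem.Set.inter (d.getD al allIng) (PySem.Set.ofList p.1))) d) d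
      = (occOf food).foldl (fun d o =>
          d.insert o.1 (PySem.Set.inter (d.getD o.1 allIng) o.2)) d := by
  unfold occOf
  rw [List.foldl_flatMap]
  simp only [List.foldl_map]

-- lookup in A's dict is a per-allergen fold
theorem getD_foldA (allIng : PySem.Set String) (al : String) :
    ∀ (L : List (String × PySem.Set String)) (d : PySem.Dict String (List String)),
    (L.foldl (fun d o => d.insert o.1 (PySem.Set.inter (d.getD o.1 allIng) o.2)) d).getD al allIng
      = L.foldl (fun s o => if o.1 = al then PySem.Set.inter s o.2 else s) (d.getD al allIng) := by
  intro L
  induction L with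
  | nil => intro d; rfl
  | cons o L ih =>
    intro d
    have hacc : (if al = o.1 then PySem.Set.inter (d.getD o.1 allIng) o.2 else d.getD al allIng)
        = (if o.1 = al then PySem.Set.inter (d.getD al allIng) o.2 else d.getD al allIng) := by
      by_cases h : o.1 = al
      · subst h; rfl
      · rw [if_neg (Ne.symm h), if_neg h]
    simp only [List.foldl_cons]
    rw [ih, PySem.Dict.getD_insert, hacc]

-- the per-allergen intersection fold is a filter
theorem valA_filter (al : String) :
    ∀ (L : List (String × PySem.Set String)) (s : List String),
    L.foldl (fun s o => if o.1 = al then PySem.Set.inter s o.2 else s) s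
      = s.filter (fun x => L.all (fun o => !(o.1 == al) || PySem.Set.contains o.2 x)) := by
  intro L
  induction L with
  | nil => intro s; simp
  | cons o L ih =>
    intro s
    rw [List.foldl_cons, ih]
    by_cases h : o.1 = al
    · rw [if_pos h]
      show List.filter _ (List.filter _ s) = _
      rw [List.filter_filter]
      apply List.filter_congr
      intro x _
      simp [h, Bool.and_comm]
    · rw [if_neg h]
      apply List.filter_congr
      intro x _
      simp [h]

-- count of x in a duplicate-free list, as countP of (· == x)
theorem countP_beq_nodup (x : String) :
    ∀ (l : List String), l.Nodup → l.countP (fun y => y == x) = if x ∈ l then 1 else 0 := by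
  intro l
  induction l with
  | nil => intro _; simp
  | cons a l ih =>
    intro hnd
    rcases List.nodup_cons.mp hnd with ⟨ha, hl⟩
    by_cases hax : a = x
    · subst hax
      simp [ih hl, ha]
    · simp [hax, ih hl, Ne.symm hax]

-- lookup in B's nested co-occurrence dict counts co-occurrences
theorem co_getD (al x : String) :
    ∀ (L : List (String × PySem.Set String)), (∀ o ∈ L, (o.2 : List String).Nodup) →
    ∀ (d : PySem.Dict String (PySem.Dict String Int)),
    ((L.foldl (fun d o => d.modify o.1 PySem.Dict.empty (fun c =>
        o.2.foldl (fun c ing => c.modify ing 0 (· + 1)) c)) d).getD al PySem.Dict.empty).getD x 0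
      = (d.getD al PySem.Dict.empty).getD x 0
        + (L.countP (fun o => o.1 == al && PySem.Set.contains o.2 x) : Int) := by
  intro L
  induction L with
  | nil => intro _ d; simp
  | cons o L ih =>
    intro hnd d
    simp only [List.foldl_cons, List.countP_cons]
    rw [ih (fun o ho => hnd o (List.mem_cons_of_mem _ ho)), PySem.Dict.getD_modify]
    have hcnt : List.count x (o.2 : List String) = if x ∈ (o.2 : List String) then 1 else 0 := by
      rw [List.count_eq_countP]
      exact countP_beq_nodup x o.2 (hnd o List.mem_cons_self)
    by_cases h : al = o.1
    · rw [if_pos h, PySem.Dict.getD_foldl_modify_add_one, hcnt]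
      by_cases hm : x ∈ (o.2 : List String) <;> simp [hm, h] <;> omega
    · rw [if_neg h]
      have hox : (o.1 == al) = false := by
        simp only [beq_eq_false_iff_ne, ne_eq]
        exact fun e => h e.symm
      simp [hox]

theorem count_total (al : String) (L : List (String × PySem.Set String)) :
    (L.map (fun o => o.1)).count al = L.countP (fun o => o.1 == al) := by
  rw [List.count_eq_countP, List.countP_map]
  rfl

-- counting test ↔ membership-everywhere test
theorem counts_iff (al x : String) :
    ∀ (L : List (String × PySem.Set String)),
    (L.countP (fun o => o.1 == al && PySem.Set.contains o.2 x) = L.countP (fun o => o.1 == al))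
      ↔ L.all (fun o => !(o.1 == al) || PySem.Set.contains o.2 x) = true := by
  intro L
  induction L with
  | nil => simp
  | cons o L ih =>
    have hle : L.countP (fun o => o.1 == al && PySem.Set.contains o.2 x)
        ≤ L.countP (fun o => o.1 == al) := by
      apply List.countP_mono_left
      intro a _ h
      exact Bool.and_elim_left h
    simp only [List.countP_cons, List.all_cons, Bool.and_eq_true, ← ih]
    by_cases h1 : (o.1 == al) = true <;> by_cases h2 : x ∈ (o.2 : List String) <;>
      simp [h1, h2] at hle ⊢ <;> omega

theorem nodup_fold_update :
    ∀ (food : List (List String × List String)) (s : PySem.Set String), s.Nodup →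
    (food.foldl (fun s p => PySem.Set.update s p.1) s).Nodup := by
  intro food
  induction food with
  | nil => intro s hs; exact hs
  | cons p food ih => intro s hs; exact ih _ (PySem.Set.nodup_update _ _ hs)

-- a loop inserting fresh distinct keys appends its items
theorem itemsB_fold (v : String → List String) :
    ∀ (ks : List String), ks.Nodup → ∀ (d : PySem.Dict String (List String)),
    (∀ a ∈ ks, d.contains a = false) →
    (ks.foldl (fun d al => d.insert al (v al)) d).items = d.items ++ ks.map (fun al => (al, v al)) := by
  intro ks
  induction ks with
  | nil => intro _ d _; simp
  | cons a ks ih =>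
    intro hnd d hfresh
    rcases List.nodup_cons.mp hnd with ⟨ha, hks⟩
    rw [List.foldl_cons, ih hks _ ?_]
    · rw [PySem.Dict.items_insert_of_not_contains _ _ (hfresh a List.mem_cons_self)]
      simp
    · intro b hb
      rw [PySem.Dict.contains_insert]
      have hba : (b == a) = false := by
        simp only [beq_eq_false_iff_ne, ne_eq]
        intro hba; exact ha (hba ▸ hb)
      rw [hba, hfresh b (List.mem_cons_of_mem _ hb), Bool.or_self]

-- A's dict, as items
theorem itemsA (allIng : PySem.Set String) (L : List (String × PySem.Set String)) :
    (L.foldl (fun d o => d.insert o.1 (PySem.Set.inter (d.getD o.1 allIng) o.2))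
        PySem.Dict.empty).items
      = (PySem.Set.ofList (L.map (fun o => o.1))).map (fun al => (al, valOf allIng L al)) := by
  have hkeys : (L.foldl (fun d o => d.insert o.1 (PySem.Set.inter (d.getD o.1 allIng) o.2))
      PySem.Dict.empty).keys = PySem.Set.ofList (L.map (fun o => o.1)) := by
    rw [PySem.Dict.keys_foldl_insert_key]
    simp [PySem.Set.update_nil_left]
  have hnd : (L.foldl (fun d o => d.insert o.1 (PySem.Set.inter (d.getD o.1 allIng) o.2))
      PySem.Dict.empty).keys.Nodup := by
    rw [hkeys]; apply PySem.Set.nodup_ofList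
  rw [PySem.Dict.items_eq_map_keys _ hnd allIng, hkeys]
  apply List.map_congr_left
  intro al _
  rw [getD_foldA, PySem.Dict.getD_empty, valA_filter]
  rfl

-- B's per-allergen value equals A's
theorem valB_eq (allIng : PySem.Set String) (L : List (String × PySem.Set String))
    (hnd : (allIng : List String).Nodup) (hsnd : ∀ o ∈ L, (o.2 : List String).Nodup)
    (al : String) :
    PySem.Set.ofList (allIng.filter (fun x =>
        ((L.foldl (fun d o => d.modify o.1 PySem.Dict.empty (fun c =>
            o.2.foldl (fun c ing => c.modify ing 0 (· + 1)) c)) PySem.Dict.empty).getD al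
              PySem.Dict.empty).getD x 0
          == (PySem.Dict.counter (L.map (fun o => o.1))).getD al 0))
      = valOf allIng L al := by
  have hcond : ∀ x ∈ (allIng : List String),
      (((L.foldl (fun d o => d.modify o.1 PySem.Dict.empty (fun c =>
          o.2.foldl (fun c ing => c.modify ing 0 (· + 1)) c)) PySem.Dict.empty).getD al
            PySem.Dict.empty).getD x 0
        == (PySem.Dict.counter (L.map (fun o => o.1))).getD al 0)
        = L.all (fun o => !(o.1 == al) || PySem.Set.contains o.2 x) := by
    intro x _
    rw [co_getD al x L hsnd PySem.Dict.empty, PySem.Dict.getD_counter, count_total]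
    simp only [PySem.Dict.getD_empty, zero_add]
    rw [Bool.eq_iff_iff]
    simp only [beq_iff_eq, Nat.cast_inj]
    exact counts_iff al x L
  rw [List.filter_congr hcond]
  exact PySem.Set.ofList_eq_self_of_nodup _ (List.Nodup.filter _ hnd)

theorem calculate_possible_alergens_key : ∀ (food : List (List String × List String)),
    calculate_possible_alergens food = calculate_possible_alergens_alt food := by
  intro food
  unfold calculate_possible_alergens calculate_possible_alergens_alt
  have hall : food.foldl (fun s p => p.1.foldl (fun s i => PySem.Set.add s i) s) PySem.Set.empty
      = food.foldl (fun s p => PySem.Set.update s p.1) PySem.Set.empty := rfl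
  have hp := pairfold food PySem.Set.empty []
  rw [List.nil_append] at hp
  simp only [hp]
  rw [hall]
  set allIng : PySem.Set String :=
    food.foldl (fun s p => PySem.Set.update s p.1) PySem.Set.empty with hIng
  refine Prod.ext ?_ rfl
  rw [foldA_eq, itemsA]
  have hknd : ((PySem.Dict.counter ((occOf food).map (fun o => o.1))).keys).Nodup :=
    PySem.Dict.nodup_keys_counter _
  have hfresh : ∀ a ∈ (PySem.Dict.counter ((occOf food).map (fun o => o.1))).keys,
      (PySem.Dict.empty : PySem.Dict String (List String)).contains a = false := by
    intro a _; exact PySem.Dict.contains_empty a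
  rw [itemsB_fold _ _ hknd _ hfresh, PySem.Dict.keys_counter]
  simp only [show (PySem.Dict.empty : PySem.Dict String (List String)).items = [] from rfl,
    List.nil_append]
  apply List.map_congr_left
  intro al _
  rw [valB_eq allIng (occOf food) (nodup_fold_update food PySem.Set.empty List.nodup_nil)
    (nodup_snd_occOf food) al]

-- ===== VERDICT (by name: the statement is the Claim_ definition above) =====
theorem calculate_possible_alergens_spec : Claim_equal_calculate_possible_alergens := by
  intro food _
  exact calculate_possible_alergens_key food
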